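-- pv_equiv track=rewrite | github.com/pypi-data/pypi-mirror-392 | packages/mitre-graphex/mitre_graphex-1.16.4-py3-none-any.whl/graphex/util.py | find_graph_inputs_line_number
-- ===== SOURCE A (Python) =====
-- import typing
--
-- def find_graph_inputs_line_number(file_content_lines: typing.List[str]):
--     """
--     Searches the provided list of file contents backwards to find the line number where the graph inputs start.
--     :param file_content_lines: the contents of the file to search (broken up into individual lines)
--
--     :returns: The line number where the graph inputs key is found or -1 if the key isn't found
--     """
--     key_name: str = "inputs:"
--     # step backwards in the file contents to find the input key
--     last_index = len(file_content_lines) - 1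
--     for i in range(last_index, 0, -1):
--         line = file_content_lines[i].strip().lower().strip("\r").strip("\n")
--         next_lines: typing.List[str] = [
--             file_content_lines[i - 1].strip().lower().strip("\r").strip("\n"),
--             file_content_lines[i - 2].strip().lower().strip("\r").strip("\n"),
--         ]
--         if line == key_name:
--             if any("xy:" in element for element in next_lines):
--                 continue
--             return i + 1
--     # there are no graph inputs in the file
--     return -1
-- ===== SOURCE B (Python) =====
-- def find_graph_inputs_line_number(file_content_lines):
--     norm = [s.strip().lower().strip("\r").strip("\n") for s in file_content_lines]
--     candidates = [
--         i for i in range(1, len(norm))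
--         if norm[i] == "inputs:"
--         and not ("xy:" in norm[i - 1] or "xy:" in norm[i - 2])
--     ]
--     return max(candidates) + 1 if candidates else -1
-- ===== Notes on version B (the rewrite author's own statement) =====
-- stated objective: alternative
-- what changed: Replaces the backward early-return scan (which re-normalizes three lines per iteration) by a single normalization pass followed by a forward collect-all-candidates comprehension whose maximum is taken at the end.
import Mathlib
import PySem

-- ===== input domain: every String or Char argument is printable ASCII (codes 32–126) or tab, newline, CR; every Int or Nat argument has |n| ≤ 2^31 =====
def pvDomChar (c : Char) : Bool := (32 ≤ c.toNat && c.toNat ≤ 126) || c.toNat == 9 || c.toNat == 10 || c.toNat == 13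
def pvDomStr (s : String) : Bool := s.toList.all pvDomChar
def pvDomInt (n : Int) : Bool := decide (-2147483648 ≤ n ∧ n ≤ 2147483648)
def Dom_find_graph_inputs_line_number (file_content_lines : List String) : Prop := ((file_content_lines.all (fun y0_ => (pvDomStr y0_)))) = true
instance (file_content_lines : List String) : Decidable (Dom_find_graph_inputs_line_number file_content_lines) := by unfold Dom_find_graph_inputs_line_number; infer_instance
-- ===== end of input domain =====

-- B replaces A's backward early-return scan by normalize-once, collect all candidate indices forward, then take the maximum (alternative decomposition, same cost).

-- ===== PORT A =====
-- `s.strip().lower().strip("\r").strip("\n")` — the normalization both Pythons apply verbatim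
def pvNorm (s : String) : String :=
  PySem.Str.stripChars (PySem.Str.stripChars (PySem.Str.lower (PySem.Str.strip s)) "\r") "\n"

def pvGoA (file_content_lines : List String) : List Int → Int
  | [] => -1
  | i :: rest =>
    let line := pvNorm (PySem.List.pyGetD file_content_lines i "")
    let next_lines : List String :=
      [pvNorm (PySem.List.pyGetD file_content_lines (i - 1) ""),
       pvNorm (PySem.List.pyGetD file_content_lines (i - 2) "")]
    if line == "inputs:" then
      if next_lines.any (fun element => PySem.Str.isIn "xy:" element) then
        pvGoA file_content_lines rest
      else i + 1
    else pvGoA file_content_lines rest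

def find_graph_inputs_line_number (file_content_lines : List String) : Int :=
  pvGoA file_content_lines
    (PySem.List.pyRange (PySem.List.len file_content_lines - 1) 0 (-1))

-- ===== PORT B =====
def find_graph_inputs_line_number_alt (file_content_lines : List String) : Int :=
  let norm := file_content_lines.map (fun s => pvNorm s)
  let candidates := (PySem.List.pyRange 1 (PySem.List.len norm)).filter (fun i =>
    (PySem.List.pyGetD norm i "" == "inputs:")
    && !(PySem.Str.isIn "xy:" (PySem.List.pyGetD norm (i - 1) "")
         || PySem.Str.isIn "xy:" (PySem.List.pyGetD norm (i - 2) "")))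
  match PySem.List.max? candidates id with
  | some m => m + 1
  | none => -1

-- ===== PRECONDITION & SPEC =====
def Spec_find_graph_inputs_line_number (file_content_lines : List String) (out : Int) : Prop := out = find_graph_inputs_line_number_alt file_content_lines
instance (file_content_lines : List String) (out : Int) : Decidable (Spec_find_graph_inputs_line_number file_content_lines out) := by unfold Spec_find_graph_inputs_line_number; infer_instance

-- ===== CLAIM (what is proved, stated in full; the proofs are below) =====
def Claim_equal_find_graph_inputs_line_number : Prop := ∀ (file_content_lines : List String), Dom_find_graph_inputs_line_number file_content_lines → Spec_find_graph_inputs_line_number file_content_lines (find_graph_inputs_line_number file_content_lines)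

-- ===== LEMMAS AND PROOFS =====

-- the shared per-index predicate both ports decide
def pvP (lines : List String) (i : Int) : Bool :=
  (pvNorm (PySem.List.pyGetD lines i "") == "inputs:")
  && !(PySem.Str.isIn "xy:" (pvNorm (PySem.List.pyGetD lines (i - 1) ""))
       || PySem.Str.isIn "xy:" (pvNorm (PySem.List.pyGetD lines (i - 2) "")))

theorem pvNorm_empty : pvNorm "" = "" := by decide

theorem pvGoA_eq_find? (lines : List String) (l : List Int) :
    pvGoA lines l = match l.find? (pvP lines) with
      | some i => i + 1
      | none => -1 := by
  induction l with
  | nil => rfl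
  | cons i rest ih =>
    simp only [pvGoA, List.find?_cons, pvP, List.any_cons, List.any_nil, Bool.or_false]
    cases h1 : (pvNorm (PySem.List.pyGetD lines i "") == "inputs:") with
    | false => simpa using ih
    | true =>
      cases h2 : (PySem.Str.isIn "xy:" (pvNorm (PySem.List.pyGetD lines (i - 1) ""))
          || PySem.Str.isIn "xy:" (pvNorm (PySem.List.pyGetD lines (i - 2) ""))) with
      | true => simpa using ih
      | false => simp

theorem pvFind?_eq_head?_filter {α : Type} (p : α → Bool) (l : List α) :
    l.find? p = (l.filter p).head? := by
  induction l with
  | nil => rfl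
  | cons x t ih =>
    by_cases h : p x
    · rw [List.find?_cons_of_pos h, List.filter_cons_of_pos h, List.head?_cons]
    · rw [List.find?_cons_of_neg h, List.filter_cons_of_neg h, ih]

theorem pvFind?_reverse {α : Type} (p : α → Bool) (l : List α) :
    l.reverse.find? p = (l.filter p).getLast? := by
  rw [pvFind?_eq_head?_filter, List.filter_reverse, List.head?_reverse]

theorem pvMax?_of_pairwise (l : List Int) (h : l.Pairwise (· < ·)) :
    PySem.List.max? l id = l.getLast? := by
  induction l using List.reverseRecOn with
  | nil => rfl
  | append_singleton l x ih =>
    have hl : l.Pairwise (· < ·) := (List.pairwise_append.mp h).1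
    have hlt : ∀ a ∈ l, a < x := fun a ha =>
      (List.pairwise_append.mp h).2.2 a ha x (List.mem_singleton.mpr rfl)
    simp only [PySem.List.max?, List.foldl_append, List.foldl_cons, List.foldl_nil] at *
    rw [ih hl]
    cases hgl : l.getLast? with
    | none => simp
    | some m =>
      have hm : m ∈ l := List.mem_of_getLast? hgl
      simp [hlt m hm]

theorem pvPred_eq (lines : List String) :
    (fun i =>
      (PySem.List.pyGetD (lines.map (fun s => pvNorm s)) i "" == "inputs:")
      && !(PySem.Str.isIn "xy:" (PySem.List.pyGetD (lines.map (fun s => pvNorm s)) (i - 1) "")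
           || PySem.Str.isIn "xy:" (PySem.List.pyGetD (lines.map (fun s => pvNorm s)) (i - 2) "")))
    = pvP lines := by
  funext i
  have h : ∀ j : Int, PySem.List.pyGetD (lines.map (fun s => pvNorm s)) j "" = pvNorm (PySem.List.pyGetD lines j "") := by
    intro j
    have := PySem.List.pyGetD_map pvNorm lines j ""
    rwa [pvNorm_empty] at this
  simp only [pvP, h]

-- ===== VERDICT (by name: the statement is the Claim_ definition above) =====
theorem find_graph_inputs_line_number_spec : Claim_equal_find_graph_inputs_line_number := by
  intro lines _
  unfold Spec_find_graph_inputs_line_number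
  unfold find_graph_inputs_line_number find_graph_inputs_line_number_alt
  simp only [pvPred_eq, List.length_map, PySem.List.len_eq]
  rw [pvGoA_eq_find?]
  have hr : PySem.List.pyRange ((lines.length : Int) - 1) 0 (-1)
      = (PySem.List.pyRange 1 (lines.length : Int)).reverse := by
    rw [PySem.List.pyRange_neg_one_eq_reverse]
    norm_num
  rw [hr, pvFind?_reverse]
  rw [pvMax?_of_pairwise _ ((PySem.List.pairwise_lt_pyRange_one 1 _).filter _)]
  try rfl
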